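-- pv_equiv track=rewrite | github.com/gwong3dsnk/CustomUE4Importer | CustomImporterFunctions.py | verifyAssetSourcePath
-- ===== SOURCE A (Python) =====
-- def verifyAssetSourcePath(sourceFilePath, ue4_destinationPath, assetType):
--     # Validates if asset file path is correct or not
--     isSourcePathCorrect = False
--     characterPathTokens = ['Bodies', 'Backpacks', 'Gloves']
--     weaponPathTokens = ['Base', 'Barrels', 'Sights', 'Foregrips', 'Charms', "Lasersights", "Bipods", "Projectiles"]
--     gadgetPathTokens = ['Explosives', 'Melee', 'SupportHeavy', 'SupportMedium', 'Parachutes']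
--     vehiclePathTokens = ['Tanks', 'Helicopters', 'Ships', 'Utility']
--     uiTexturePathTokens = ['Avatars', 'Banners', 'Frames', 'Thumbnails', "MetaArt"]
--
--     if 'Resources' in sourceFilePath:
--         if assetType == 'Characters' and any(token in sourceFilePath for token in characterPathTokens):
--             isSourcePathCorrect = True
--             return isSourcePathCorrect
--         elif assetType == 'CharacterSkins' and any(token in sourceFilePath for token in characterPathTokens):
--             isSourcePathCorrect = True
--             return isSourcePathCorrect
--         elif assetType == 'Weapons' and any(token in sourceFilePath for token in weaponPathTokens):
--             isSourcePathCorrect = True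
--             return isSourcePathCorrect
--         elif assetType == 'WeaponSkins' and 'Base' in sourceFilePath:
--             isSourcePathCorrect = True
--             return isSourcePathCorrect
--         elif (assetType == 'Gadgets' or assetType == 'GadgetSkins') and any(token in sourceFilePath for token in gadgetPathTokens):
--             isSourcePathCorrect = True
--             return isSourcePathCorrect
--         elif (assetType == 'Vehicles' or assetType == 'VehicleSkins') and any(token in sourceFilePath for token in vehiclePathTokens):
--             isSourcePathCorrect = True
--             return isSourcePathCorrect
--         elif assetType == 'UITextures' and any(token in sourceFilePath for token in uiTexturePathTokens):
--             isSourcePathCorrect = True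
--             return isSourcePathCorrect
--         else:
--             if 'Developers' in ue4_destinationPath:
--                 isSourcePathCorrect = True
--                 return isSourcePathCorrect
--             else:
--                 return isSourcePathCorrect
--     else:
--         if 'Developers' in ue4_destinationPath:
--             isSourcePathCorrect = True
--             return isSourcePathCorrect
--         else:
--             return isSourcePathCorrect
-- ===== SOURCE B (Python) =====
-- # Inverted index: scan tokens once, collect which asset types the path validates,
-- # then test membership of assetType.
-- _TOKEN_OWNERS = [
--     ('Bodies', ('Characters', 'CharacterSkins')),
--     ('Backpacks', ('Characters', 'CharacterSkins')),
--     ('Gloves', ('Characters', 'CharacterSkins')),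
--     ('Base', ('Weapons', 'WeaponSkins')),
--     ('Barrels', ('Weapons',)),
--     ('Sights', ('Weapons',)),
--     ('Foregrips', ('Weapons',)),
--     ('Charms', ('Weapons',)),
--     ('Lasersights', ('Weapons',)),
--     ('Bipods', ('Weapons',)),
--     ('Projectiles', ('Weapons',)),
--     ('Explosives', ('Gadgets', 'GadgetSkins')),
--     ('Melee', ('Gadgets', 'GadgetSkins')),
--     ('SupportHeavy', ('Gadgets', 'GadgetSkins')),
--     ('SupportMedium', ('Gadgets', 'GadgetSkins')),
--     ('Parachutes', ('Gadgets', 'GadgetSkins')),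
--     ('Tanks', ('Vehicles', 'VehicleSkins')),
--     ('Helicopters', ('Vehicles', 'VehicleSkins')),
--     ('Ships', ('Vehicles', 'VehicleSkins')),
--     ('Utility', ('Vehicles', 'VehicleSkins')),
--     ('Avatars', ('UITextures',)),
--     ('Banners', ('UITextures',)),
--     ('Frames', ('UITextures',)),
--     ('Thumbnails', ('UITextures',)),
--     ('MetaArt', ('UITextures',)),
-- ]
--
-- def verifyAssetSourcePath(sourceFilePath, ue4_destinationPath, assetType):
--     if 'Resources' in sourceFilePath:
--         validatedTypes = set()
--         for token, owners in _TOKEN_OWNERS: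
--             if token in sourceFilePath:
--                 validatedTypes.update(owners)
--         if assetType in validatedTypes:
--             return True
--     return 'Developers' in ue4_destinationPath
-- ===== Notes on version B (the rewrite author's own statement) =====
-- stated objective: alternative
-- what changed: Inverts the dispatch: instead of branching on assetType and scanning that type's token list, B scans a flat token->asset-types inverted index once, accumulates the set of asset types the path validates, and then tests assetType membership, with one shared Developers fallback.
import Mathlib
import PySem

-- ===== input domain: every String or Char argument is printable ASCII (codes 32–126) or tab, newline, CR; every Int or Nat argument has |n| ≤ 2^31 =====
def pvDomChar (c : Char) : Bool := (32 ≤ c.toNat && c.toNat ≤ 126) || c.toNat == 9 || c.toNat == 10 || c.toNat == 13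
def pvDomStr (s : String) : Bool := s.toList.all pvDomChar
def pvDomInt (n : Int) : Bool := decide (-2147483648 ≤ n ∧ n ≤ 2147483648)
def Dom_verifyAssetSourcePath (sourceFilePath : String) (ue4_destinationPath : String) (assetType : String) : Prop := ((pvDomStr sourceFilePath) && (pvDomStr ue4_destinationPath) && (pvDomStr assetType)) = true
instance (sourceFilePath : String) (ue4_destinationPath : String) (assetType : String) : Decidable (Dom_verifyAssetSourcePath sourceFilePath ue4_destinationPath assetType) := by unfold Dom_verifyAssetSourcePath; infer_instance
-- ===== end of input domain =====

-- B inverts A's type-first dispatch into a token-first inverted index: it collects the set of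
-- asset types validated by tokens found in the path, then tests assetType membership (objective: alternative).

-- ===== PORT A =====
def verifyAssetSourcePath (sourceFilePath : String) (ue4_destinationPath : String) (assetType : String) : Bool :=
  let characterPathTokens := ["Bodies", "Backpacks", "Gloves"]
  let weaponPathTokens := ["Base", "Barrels", "Sights", "Foregrips", "Charms", "Lasersights", "Bipods", "Projectiles"]
  let gadgetPathTokens := ["Explosives", "Melee", "SupportHeavy", "SupportMedium", "Parachutes"]
  let vehiclePathTokens := ["Tanks", "Helicopters", "Ships", "Utility"]
  let uiTexturePathTokens := ["Avatars", "Banners", "Frames", "Thumbnails", "MetaArt"]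
  if PySem.Str.isIn "Resources" sourceFilePath then
    if assetType == "Characters" && characterPathTokens.any (fun token => PySem.Str.isIn token sourceFilePath) then
      true
    else if assetType == "CharacterSkins" && characterPathTokens.any (fun token => PySem.Str.isIn token sourceFilePath) then
      true
    else if assetType == "Weapons" && weaponPathTokens.any (fun token => PySem.Str.isIn token sourceFilePath) then
      true
    else if assetType == "WeaponSkins" && PySem.Str.isIn "Base" sourceFilePath then
      true
    else if (assetType == "Gadgets" || assetType == "GadgetSkins") && gadgetPathTokens.any (fun token => PySem.Str.isIn token sourceFilePath) then
      true
    else if (assetType == "Vehicles" || assetType == "VehicleSkins") && vehiclePathTokens.any (fun token => PySem.Str.isIn token sourceFilePath) then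
      true
    else if assetType == "UITextures" && uiTexturePathTokens.any (fun token => PySem.Str.isIn token sourceFilePath) then
      true
    else
      if PySem.Str.isIn "Developers" ue4_destinationPath then true else false
  else
    if PySem.Str.isIn "Developers" ue4_destinationPath then true else false

-- ===== PORT B =====
-- Source B's module-level inverted index _TOKEN_OWNERS: token → asset types it validates
def pvTokenOwners : List (String × List String) :=
  [("Bodies", ["Characters", "CharacterSkins"]),
   ("Backpacks", ["Characters", "CharacterSkins"]),
   ("Gloves", ["Characters", "CharacterSkins"]),
   ("Base", ["Weapons", "WeaponSkins"]),
   ("Barrels", ["Weapons"]),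
   ("Sights", ["Weapons"]),
   ("Foregrips", ["Weapons"]),
   ("Charms", ["Weapons"]),
   ("Lasersights", ["Weapons"]),
   ("Bipods", ["Weapons"]),
   ("Projectiles", ["Weapons"]),
   ("Explosives", ["Gadgets", "GadgetSkins"]),
   ("Melee", ["Gadgets", "GadgetSkins"]),
   ("SupportHeavy", ["Gadgets", "GadgetSkins"]),
   ("SupportMedium", ["Gadgets", "GadgetSkins"]),
   ("Parachutes", ["Gadgets", "GadgetSkins"]),
   ("Tanks", ["Vehicles", "VehicleSkins"]),
   ("Helicopters", ["Vehicles", "VehicleSkins"]),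
   ("Ships", ["Vehicles", "VehicleSkins"]),
   ("Utility", ["Vehicles", "VehicleSkins"]),
   ("Avatars", ["UITextures"]),
   ("Banners", ["UITextures"]),
   ("Frames", ["UITextures"]),
   ("Thumbnails", ["UITextures"]),
   ("MetaArt", ["UITextures"])]

def verifyAssetSourcePath_alt (sourceFilePath : String) (ue4_destinationPath : String) (assetType : String) : Bool :=
  if PySem.Str.isIn "Resources" sourceFilePath then
    -- for token, owners in _TOKEN_OWNERS: if token in sourceFilePath: validatedTypes.update(owners)
    let validatedTypes : PySem.Set String :=
      pvTokenOwners.foldl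
        (fun acc p => if PySem.Str.isIn p.1 sourceFilePath then PySem.Set.update acc p.2 else acc)
        PySem.Set.empty
    if PySem.Set.contains validatedTypes assetType then true
    else PySem.Str.isIn "Developers" ue4_destinationPath
  else
    PySem.Str.isIn "Developers" ue4_destinationPath

-- ===== PRECONDITION & SPEC =====
def Spec_verifyAssetSourcePath (sourceFilePath : String) (ue4_destinationPath : String) (assetType : String) (out : Bool) : Prop := out = verifyAssetSourcePath_alt sourceFilePath ue4_destinationPath assetType
instance (sourceFilePath : String) (ue4_destinationPath : String) (assetType : String) (out : Bool) : Decidable (Spec_verifyAssetSourcePath sourceFilePath ue4_destinationPath assetType out) := by unfold Spec_verifyAssetSourcePath; infer_instance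

-- ===== CLAIM =====
def Claim_equal_verifyAssetSourcePath : Prop := ∀ (sourceFilePath : String) (ue4_destinationPath : String) (assetType : String), Dom_verifyAssetSourcePath sourceFilePath ue4_destinationPath assetType → Spec_verifyAssetSourcePath sourceFilePath ue4_destinationPath assetType (verifyAssetSourcePath sourceFilePath ue4_destinationPath assetType)

-- ===== LEMMAS AND PROOFS =====
-- Membership in B's accumulated set ⇔ some index entry whose token occurs in the path owns the type.
theorem contains_collect (s t : String) (ps : List (String × List String)) (acc : PySem.Set String) :
    PySem.Set.contains
      (ps.foldl (fun acc p => if PySem.Str.isIn p.1 s then PySem.Set.update acc p.2 else acc) acc) t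
    = (PySem.Set.contains acc t || ps.any (fun p => PySem.Str.isIn p.1 s && p.2.contains t)) := by
  induction ps generalizing acc with
  | nil => simp
  | cons p ps ih =>
    simp only [List.foldl_cons, List.any_cons, ih]
    by_cases h : PySem.Str.isIn p.1 s = true <;>
      simp only [PySem.Str.isIn] at h <;>
      simp [h, PySem.Set.mem_update, PySem.Str.isIn, Bool.or_assoc]

-- ===== VERDICT =====
set_option maxHeartbeats 1000000 in
theorem verifyAssetSourcePath_spec : Claim_equal_verifyAssetSourcePath := by
  intro s d t _
  unfold Spec_verifyAssetSourcePath verifyAssetSourcePath verifyAssetSourcePath_alt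
  by_cases hr : PySem.Str.isIn "Resources" s = true
  · simp only [hr, contains_collect, pvTokenOwners]
    by_cases h1 : t = "Characters"; · subst h1; simp
    by_cases h2 : t = "CharacterSkins"; · subst h2; simp
    by_cases h3 : t = "Weapons"; · subst h3; simp
    by_cases h4 : t = "WeaponSkins"; · subst h4; simp
    by_cases h5 : t = "Gadgets"; · subst h5; simp
    by_cases h6 : t = "GadgetSkins"; · subst h6; simp
    by_cases h7 : t = "Vehicles"; · subst h7; simp
    by_cases h8 : t = "VehicleSkins"; · subst h8; simp
    by_cases h9 : t = "UITextures"; · subst h9; simp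
    simp [h1, h2, h3, h4, h5, h6, h7, h8, h9]
  · simp only [PySem.Str.isIn] at hr
    simp at hr
    simp [hr]
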